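-- pv_equiv track=rewrite | github.com/neurord/ajustador | ajustador/helpers/copy_param/process_param_chan.py | get_chan_name_data_index
-- ===== SOURCE A (Python) =====
-- def get_chan_name_data_index(param_name, chan_param_name_relation):
--     data_index = None
--     for chan_name in chan_param_name_relation.keys():
--         try:
--             data_index = chan_param_name_relation[chan_name].index(param_name)
--             return (chan_name, data_index)
--         except ValueError:
--             continue
--     raise ValueError('Unable to find {} in param_chan.py!!!!'.format(param_name))
-- ===== SOURCE B (Python) =====
-- def get_chan_name_data_index(param_name, chan_param_name_relation):
--     table = {}
--     for chan_name, names in chan_param_name_relation.items():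
--         for idx, name in enumerate(names):
--             if name not in table:
--                 table[name] = (chan_name, idx)
--     try:
--         return table[param_name]
--     except KeyError:
--         raise ValueError('Unable to find {} in param_chan.py!!!!'.format(param_name))
-- ===== Notes on version B (the rewrite author's own statement) =====
-- stated objective: alternative
-- what changed: B builds a first-occurrence reverse index (name -> (chan_name, idx)) in one pass over all lists and answers by a single dict lookup, instead of A's per-channel .index scan with try/except early return.
import Mathlib
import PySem

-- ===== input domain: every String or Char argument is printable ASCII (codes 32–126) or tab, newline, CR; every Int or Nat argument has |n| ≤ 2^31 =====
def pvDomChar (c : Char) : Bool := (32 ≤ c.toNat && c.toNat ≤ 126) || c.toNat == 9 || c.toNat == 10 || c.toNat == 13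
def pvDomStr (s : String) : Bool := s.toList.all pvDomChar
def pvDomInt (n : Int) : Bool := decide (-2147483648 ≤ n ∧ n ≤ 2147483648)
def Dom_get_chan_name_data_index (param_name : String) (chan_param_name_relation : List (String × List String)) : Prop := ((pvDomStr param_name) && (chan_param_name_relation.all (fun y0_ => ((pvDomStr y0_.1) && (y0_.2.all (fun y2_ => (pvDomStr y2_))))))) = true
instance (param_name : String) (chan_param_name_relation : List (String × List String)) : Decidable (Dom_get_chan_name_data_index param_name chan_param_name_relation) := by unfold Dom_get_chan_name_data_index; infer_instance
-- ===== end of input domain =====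

-- B replaces A's per-channel .index scan with a first-occurrence reverse index built once and
-- a single lookup (alternative decomposition, same cost). Return-value equivalence only.

-- ===== PORT A =====
def get_chan_name_data_index (param_name : String) (chan_param_name_relation : List (String × List String)) : String × Int :=
  match chan_param_name_relation with
  | [] => ("", 0)   -- Python raises ValueError here; excluded by Pre_
  | (chan_name, names) :: rest =>
    match PySem.List.index? names param_name with
    | some i => (chan_name, (i : Int))
    | none => get_chan_name_data_index param_name rest

-- ===== PORT B =====
-- the reverse index: name -> (chan_name, index), keeping only the first occurrence
def pvBuildTable (chan_param_name_relation : List (String × List String)) : PySem.Dict String (String × Int) :=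
  chan_param_name_relation.foldl
    (fun t cw =>
      (PySem.List.enumerate cw.2 0).foldl
        (fun t2 p => if t2.contains p.2 then t2 else t2.insert p.2 (cw.1, p.1)) t)
    PySem.Dict.empty

def get_chan_name_data_index_alt (param_name : String) (chan_param_name_relation : List (String × List String)) : String × Int :=
  match (pvBuildTable chan_param_name_relation).get? param_name with
  | some r => r
  | none => ("", 0)   -- Python raises ValueError here; excluded by Pre_

-- ===== PRECONDITION & SPEC =====
-- Pre_ excludes exactly the inputs where A raises ValueError: param_name occurs in no list.
def Pre_get_chan_name_data_index (param_name : String) (chan_param_name_relation : List (String × List String)) : Prop :=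
  ∃ pair ∈ chan_param_name_relation, param_name ∈ pair.2
instance (param_name : String) (chan_param_name_relation : List (String × List String)) : Decidable (Pre_get_chan_name_data_index param_name chan_param_name_relation) := by unfold Pre_get_chan_name_data_index; infer_instance

def pvWitness_get_chan_name_data_index : String × (List (String × List String)) :=
  ("kAf", [("Krp", ["x", "y"]), ("KaF", ["kAf", "z"])])

def Spec_get_chan_name_data_index (param_name : String) (chan_param_name_relation : List (String × List String)) (out : String × Int) : Prop := out = get_chan_name_data_index_alt param_name chan_param_name_relation
instance (param_name : String) (chan_param_name_relation : List (String × List String)) (out : String × Int) : Decidable (Spec_get_chan_name_data_index param_name chan_param_name_relation out) := by unfold Spec_get_chan_name_data_index; infer_instance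

-- ===== CLAIM (what is proved, stated in full; the proofs are below) =====
def Claim_equal_get_chan_name_data_index : Prop := ∀ (param_name : String) (chan_param_name_relation : List (String × List String)), Dom_get_chan_name_data_index param_name chan_param_name_relation → Pre_get_chan_name_data_index param_name chan_param_name_relation → Spec_get_chan_name_data_index param_name chan_param_name_relation (get_chan_name_data_index param_name chan_param_name_relation)

-- ===== LEMMAS AND PROOFS =====

-- A's search as an Option-valued function (proof helper only)
def pvSearch (q : String) : List (String × List String) → Option (String × Int)
  | [] => none
  | (cn, ns) :: rest =>
    match PySem.List.index? ns q with
    | some i => some (cn, (i : Int))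
    | none => pvSearch q rest

theorem pvInner_get? (cn : String) (names : List String) (q : String) :
    ∀ (s : Int) (t : PySem.Dict String (String × Int)),
    ((PySem.List.enumerate names s).foldl
        (fun t2 p => if t2.contains p.2 then t2 else t2.insert p.2 (cn, p.1)) t).get? q
      = (t.get? q).or ((PySem.List.index? names q).map (fun (i : Nat) => (cn, s + (i : Int)))) := by
  induction names with
  | nil =>
    intro s t
    rw [PySem.List.enumerate_nil, PySem.List.index?_eq_idxOf?]
    simp
  | cons x xs ih =>
    intro s t
    rw [PySem.List.enumerate_cons, List.foldl_cons, ih]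
    by_cases hx : x = q
    · subst hx
      rw [PySem.List.index?_cons_self]
      by_cases hc : t.contains x = true
      · have hs : (t.get? x).isSome := by
          rw [← PySem.Dict.contains_eq_isSome_get?]; exact hc
        obtain ⟨v, hv⟩ := Option.isSome_iff_exists.mp hs
        simp [hc, hv]
      · have hn : t.get? x = none := by
          rw [PySem.Dict.contains_eq_isSome_get?] at hc
          cases h : t.get? x with
          | none => rfl
          | some v => rw [h] at hc; simp at hc
        simp [hc, hn, PySem.Dict.get?_insert_self]
    · rw [PySem.List.index?_cons_of_ne xs hx]
      have e1 : (if t.contains x = true then t else t.insert x (cn, s)).get? q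
          = t.get? q := by
        split
        · rfl
        · rw [PySem.Dict.get?_insert]; simp [Ne.symm hx]
      rw [e1]
      congr 1
      cases h : PySem.List.index? xs q with
      | none => simp only [Option.map_none]
      | some i =>
        simp only [Option.map_some]
        congr 1
        congr 1
        push_cast
        omega

theorem pvBuild_get? (q : String) (rel : List (String × List String)) :
    ∀ (t : PySem.Dict String (String × Int)),
    (rel.foldl
      (fun t cw =>
        (PySem.List.enumerate cw.2 0).foldl
          (fun t2 p => if t2.contains p.2 then t2 else t2.insert p.2 (cw.1, p.1)) t) t).get? q
      = (t.get? q).or (pvSearch q rel) := by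
  induction rel with
  | nil => intro t; simp [pvSearch]
  | cons cw rest ih =>
    rcases cw with ⟨cn, ns⟩
    intro t
    rw [List.foldl_cons, ih, pvInner_get? cn ns q 0 t, Option.or_assoc]
    congr 1
    cases h : PySem.List.index? ns q with
    | none =>
      rw [PySem.List.index?_eq_idxOf?] at h
      simp [pvSearch, PySem.List.index?_eq_idxOf?, h]
    | some i =>
      rw [PySem.List.index?_eq_idxOf?] at h
      simp [pvSearch, PySem.List.index?_eq_idxOf?, h]

theorem pvSearch_eq_some (q : String) (rel : List (String × List String))
    (h : ∃ pair ∈ rel, q ∈ pair.2) :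
    pvSearch q rel = some (get_chan_name_data_index q rel) := by
  induction rel with
  | nil => simp at h
  | cons cw rest ih =>
    rcases cw with ⟨cn, ns⟩
    cases hi : PySem.List.index? ns q with
    | some i =>
      rw [PySem.List.index?_eq_idxOf?] at hi
      simp [pvSearch, get_chan_name_data_index, PySem.List.index?_eq_idxOf?, hi]
    | none =>
      have hq : q ∉ ns := by
        rw [← PySem.List.index?_eq_none_iff (xs := ns) (v := q)]; exact hi
      simp only [pvSearch, get_chan_name_data_index, hi]
      apply ih
      rcases h with ⟨p, hp, hqp⟩
      rcases List.mem_cons.mp hp with rfl | hp'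
      · exact absurd hqp hq
      · exact ⟨p, hp', hqp⟩

-- ===== VERDICT (by name: the statement is the Claim_ definition above) =====
theorem get_chan_name_data_index_spec : Claim_equal_get_chan_name_data_index := by
  intro param_name rel _ hpre
  unfold Spec_get_chan_name_data_index get_chan_name_data_index_alt pvBuildTable
  rw [pvBuild_get? param_name rel PySem.Dict.empty, PySem.Dict.get?_empty,
    Option.none_or, pvSearch_eq_some param_name rel hpre]
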